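-- pv_equiv track=rewrite | github.com/SScangeles/ss-cloud-apr2021-python | coding-exercise8.py | func13
-- ===== SOURCE A (Python) =====
-- def func13(stringIn):
--     result = []
--     for x in range(1, len(stringIn)+1):
--         if x == 1 or x == 4:
--             result.append(stringIn[x-1].upper())
--         else:
--             result.append(stringIn[x-1])
--     return "".join(result)
-- ===== SOURCE B (Python) =====
-- def func13(stringIn):
--     return stringIn[:1].upper() + stringIn[1:3] + stringIn[3:4].upper() + stringIn[4:]
-- ===== Notes on version B (the rewrite author's own statement) =====
-- stated objective: idiomatic
-- what changed: Replaced the per-character index loop that tests x==1 or x==4 on every position with a single closed-form concatenation of four slices, uppercasing only the two one-character slices.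
import Mathlib
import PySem

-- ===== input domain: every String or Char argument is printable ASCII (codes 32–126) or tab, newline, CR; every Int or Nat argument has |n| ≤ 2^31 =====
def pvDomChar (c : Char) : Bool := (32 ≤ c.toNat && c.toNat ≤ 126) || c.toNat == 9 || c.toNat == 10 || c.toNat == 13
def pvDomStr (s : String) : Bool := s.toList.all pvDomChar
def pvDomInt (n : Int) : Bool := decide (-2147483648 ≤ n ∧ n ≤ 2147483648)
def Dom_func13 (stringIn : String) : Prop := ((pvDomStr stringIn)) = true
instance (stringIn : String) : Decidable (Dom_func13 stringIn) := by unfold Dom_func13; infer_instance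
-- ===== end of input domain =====

-- B replaces A's per-character index loop by a closed-form concatenation of four slices (idiomatic; same cost).

-- ===== PORT A =====
-- A: loop x over range(1, len+1), appending stringIn[x-1] uppercased when x == 1 or x == 4, then "".join.
def func13 (stringIn : String) : String :=
  let cs := stringIn.toList
  let result := (PySem.List.pyRange 1 ((cs.length : Int) + 1) 1).foldl
    (fun acc x =>
      if x == 1 || x == 4 then
        acc ++ [PySem.Chars.upperChar (PySem.List.pyGetD cs (x - 1) ' ')]
      else
        acc ++ [PySem.List.pyGetD cs (x - 1) ' ']) []
  String.ofList result

-- ===== PORT B =====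
-- B: stringIn[:1].upper() + stringIn[1:3] + stringIn[3:4].upper() + stringIn[4:]
def func13_alt (stringIn : String) : String :=
  let cs := stringIn.toList
  String.ofList
    (PySem.Chars.upper (PySem.List.slice cs none (some 1)) ++
     PySem.List.slice cs (some 1) (some 3) ++
     PySem.Chars.upper (PySem.List.slice cs (some 3) (some 4)) ++
     PySem.List.slice cs (some 4) none)

-- ===== PRECONDITION & SPEC =====
def Spec_func13 (stringIn : String) (out : String) : Prop := out = func13_alt stringIn
instance (stringIn : String) (out : String) : Decidable (Spec_func13 stringIn out) := by unfold Spec_func13; infer_instance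

-- ===== CLAIM (what is proved, stated in full; the proofs are below) =====
def Claim_equal_func13 : Prop := ∀ (stringIn : String), Dom_func13 stringIn → Spec_func13 stringIn (func13 stringIn)

-- ===== LEMMAS AND PROOFS =====

-- The loop of A, restated over the character list, equals B's four-slice concatenation.
theorem func13_core (cs : List Char) :
    (PySem.List.pyRange 1 ((cs.length : Int) + 1) 1).foldl
    (fun acc x =>
      if x == 1 || x == 4 then
        acc ++ [PySem.Chars.upperChar (PySem.List.pyGetD cs (x - 1) ' ')]
      else
        acc ++ [PySem.List.pyGetD cs (x - 1) ' ']) [] =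
    PySem.Chars.upper (PySem.List.slice cs none (some 1)) ++
     PySem.List.slice cs (some 1) (some 3) ++
     PySem.Chars.upper (PySem.List.slice cs (some 3) (some 4)) ++
     PySem.List.slice cs (some 4) none := by
  have ht : (((cs.length : Int) + 1) - 1).toNat = cs.length := by omega
  rw [PySem.List.pyRange_one, ht, List.foldl_map]
  have hf : (fun (acc : List Char) (k : Nat) =>
      if (1 + (k:Int) == 1 || 1 + (k:Int) == 4) = true then
        acc ++ [PySem.Chars.upperChar (PySem.List.pyGetD cs (1 + (k:Int) - 1) ' ')]
      else acc ++ [PySem.List.pyGetD cs (1 + (k:Int) - 1) ' '])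
      = (fun acc k => acc ++ [if k == 0 || k == 3 then
          PySem.Chars.upperChar (cs.getD k ' ') else cs.getD k ' ']) := by
    funext acc k
    have h1 : (1 : Int) + (k:Int) - 1 = (k:Int) := by ring
    have h2 : ((1 + (k:Int) == 1 || 1 + (k:Int) == 4)) = (k == 0 || k == 3) := by
      rcases k with _|_|_|_|k <;> simp <;> omega
    rw [h1, h2, PySem.List.pyGetD_natCast]
    split <;> rfl
  rw [hf, PySem.List.foldl_append_singleton_eq_map]
  match cs with
  | [] => rfl
  | [a] => rfl
  | [a,b] => rfl
  | [a,b,c] => rfl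
  | a::b::c::d::t =>
    have hl : (a::b::c::d::t).length = 4 + t.length := by simp; omega
    rw [hl, List.range_add, List.map_append, List.map_map]
    have h4 : (List.map (fun k => if (k == 0 || k == 3) = true then
        PySem.Chars.upperChar ((a::b::c::d::t).getD k ' ') else (a::b::c::d::t).getD k ' ')
        (List.range 4)) = [PySem.Chars.upperChar a, b, c, PySem.Chars.upperChar d] := by
      rfl
    have h5 : (List.map ((fun k => if (k == 0 || k == 3) = true then
        PySem.Chars.upperChar ((a::b::c::d::t).getD k ' ') else (a::b::c::d::t).getD k ' ') ∘ (fun x => 4 + x))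
        (List.range t.length)) = t := by
      have : ((fun k => if (k == 0 || k == 3) = true then
          PySem.Chars.upperChar ((a::b::c::d::t).getD k ' ') else (a::b::c::d::t).getD k ' ') ∘ (fun x => 4 + x))
          = (fun k => t.getD k ' ') := by
        funext k
        simp only [Function.comp_apply, List.getD]
        rw [if_neg (by simp; omega), show 4 + k = k + 1 + 1 + 1 + 1 from by omega]
        simp [List.getElem?_cons_succ]
      rw [this]
      apply List.ext_getElem
      · simp
      · intro i h1 h2
        simp [List.getD_eq_getElem?_getD, List.getElem?_eq_getElem h2]
    rw [h4, h5]
    rw [PySem.List.slice_to _ (by norm_num), PySem.List.slice_toNat _ (by norm_num) (by norm_num),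
        PySem.List.slice_toNat _ (by norm_num) (by norm_num), PySem.List.slice_from _ (by norm_num)]
    rfl


-- ===== VERDICT (by name: the statement is the Claim_ definition above) =====
theorem func13_spec : Claim_equal_func13 := by
  intro s _
  unfold Spec_func13 func13 func13_alt
  exact congrArg String.ofList (func13_core s.toList)
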